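-- pv_equiv track=rewrite | github.com/Troy-Wang/LeetCode | 201610_Week3/20161022_1.py | analysisPattern
-- ===== SOURCE A (Python) =====
-- def analysisPattern(pattern):
--     dict = {}
--     count = 0
--     for eachDigit in pattern:
--         if eachDigit not in dict.keys():
--             dict[eachDigit] = [count]
--         else:
--             dict[eachDigit].append(count)
--         count += 1
--     return dict.values()
-- ===== SOURCE B (Python) =====
-- def analysisPattern(pattern):
--     d = {digit: [i for i, x in enumerate(pattern) if x == digit]
--          for digit in dict.fromkeys(pattern)}
--     return d.values()
-- ===== Notes on version B (the rewrite author's own statement) =====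
-- stated objective: idiomatic
-- what changed: Replaces A's single incremental pass with a manual counter and per-key append/insert branches by a dict/list comprehension: distinct characters via dict.fromkeys, then one enumerate-scan per distinct character collecting its indices.
import Mathlib
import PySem

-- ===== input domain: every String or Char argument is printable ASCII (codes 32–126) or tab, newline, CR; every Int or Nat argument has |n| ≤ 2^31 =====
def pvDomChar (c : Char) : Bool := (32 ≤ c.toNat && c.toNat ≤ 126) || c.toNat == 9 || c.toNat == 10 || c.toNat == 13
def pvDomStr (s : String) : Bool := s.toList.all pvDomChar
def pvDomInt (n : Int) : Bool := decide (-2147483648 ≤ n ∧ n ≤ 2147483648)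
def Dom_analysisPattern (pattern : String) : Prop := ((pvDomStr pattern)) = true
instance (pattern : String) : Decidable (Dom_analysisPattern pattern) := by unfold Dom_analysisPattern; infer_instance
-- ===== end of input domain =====

-- B replaces A's single incremental pass (mutable dict + running counter) by a per-distinct-character
-- index-collection comprehension over enumerate(pattern); objective: idiomatic, same return value.

-- ===== PORT A =====
-- one pass: dict of lists keyed by character, counter incremented each step
def analysisPattern (pattern : String) : List (List Int) :=
  (pattern.toList.foldl
    (fun (s : PySem.Dict Char (List Int) × Int) c =>
      if s.1.contains c = false then (s.1.insert c [s.2], s.2 + 1)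
      else (s.1.modify c [] (fun v => v ++ [s.2]), s.2 + 1))
    (PySem.Dict.empty, 0)).1.values

-- ===== PORT B =====
-- distinct characters in first-occurrence order, then the index list of each via enumerate+filter
def analysisPattern_alt (pattern : String) : List (List Int) :=
  (PySem.List.dedup pattern.toList).map (fun digit =>
    ((PySem.List.enumerate pattern.toList 0).filter (fun p => p.2 == digit)).map (fun p => p.1))

-- ===== PRECONDITION & SPEC =====
def Spec_analysisPattern (pattern : String) (out : List (List Int)) : Prop := out = analysisPattern_alt pattern
instance (pattern : String) (out : List (List Int)) : Decidable (Spec_analysisPattern pattern out) := by unfold Spec_analysisPattern; infer_instance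

-- ===== CLAIM (what is proved, stated in full; the proofs are below) =====
def Claim_equal_analysisPattern : Prop := ∀ (pattern : String), Dom_analysisPattern pattern → Spec_analysisPattern pattern (analysisPattern pattern)

-- ===== LEMMAS AND PROOFS =====

-- index list of character c in l (what B computes per distinct character)
def pvIdxs (l : List Char) (c : Char) : List Int :=
  ((PySem.List.enumerate l 0).filter (fun p => p.2 == c)).map (fun p => p.1)

-- closed-form model of A's dict after processing l
def pvModel (l : List Char) : PySem.Dict Char (List Int) :=
  ⟨(PySem.List.dedup l).map (fun c => (c, pvIdxs l c))⟩

theorem pvIdxs_append_singleton (l : List Char) (x c : Char) :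
    pvIdxs (l ++ [x]) c = pvIdxs l c ++ (if x = c then [(l.length : Int)] else []) := by
  simp only [pvIdxs, PySem.List.enumerate_append, List.filter_append, List.map_append,
    PySem.List.enumerate_cons, PySem.List.enumerate_nil]
  by_cases h : x = c
  · subst h
    simp [List.filter]
  · have hb : (x == c) = false := beq_eq_false_iff_ne.mpr h
    simp [List.filter, hb, h]

theorem pvIdxs_eq_nil_of_not_mem (l : List Char) (x : Char) (hx : x ∉ l) :
    pvIdxs l x = [] := by
  simp only [pvIdxs, List.map_eq_nil_iff, List.filter_eq_nil_iff]
  intro p hp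
  rcases (PySem.List.mem_enumerate_iff _ _ _).1 hp with ⟨k, hk, rfl⟩
  simp only [beq_iff_eq]
  intro h
  exact hx (h ▸ List.getElem_mem hk)

theorem pvModel_keys_nodup (l : List Char) : (pvModel l).keys.Nodup := by
  simp only [pvModel, PySem.Dict.keys, List.map_map]
  have : ((fun p : Char × List Int => p.1) ∘ fun c => (c, pvIdxs l c)) = id := rfl
  rw [this, List.map_id]
  exact PySem.List.nodup_dedup l

theorem pvModel_contains (l : List Char) (x : Char) :
    (pvModel l).contains x = decide (x ∈ l) := by
  simp only [pvModel, PySem.Dict.contains, List.any_map, Function.comp_def]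
  by_cases hx : x ∈ l
  · simp [List.any_eq_true, hx]
  · simp only [hx, decide_false, List.any_eq_false, beq_iff_eq]
    exact fun p hp h => hx (h ▸ (PySem.List.mem_dedup l p).1 hp)

theorem pvModel_getD (l : List Char) (x : Char) (hx : x ∈ l) :
    (pvModel l).getD x [] = pvIdxs l x := by
  have hm : (x, pvIdxs l x) ∈ (pvModel l).items :=
    List.mem_map_of_mem (f := fun c => (c, pvIdxs l c)) ((PySem.List.mem_dedup l x).2 hx)
  exact PySem.Dict.getD_of_mem_items _ hm (pvModel_keys_nodup l) []

theorem pvDedup_append_singleton (l : List Char) (x : Char) :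
    PySem.List.dedup (l ++ [x]) =
      if x ∈ l then PySem.List.dedup l else PySem.List.dedup l ++ [x] := by
  simp only [PySem.List.dedup_eq_ofList, PySem.Set.ofList_eq_foldl, List.foldl_append,
    List.foldl_cons, List.foldl_nil]
  rw [← PySem.Set.ofList_eq_foldl]
  simp only [PySem.Set.add]
  by_cases hx : x ∈ l
  · rw [if_pos hx, if_pos]
    simpa [PySem.Set.contains] using (PySem.Set.mem_ofList l x).2 hx
  · rw [if_neg hx, if_neg]
    intro h
    exact hx ((PySem.Set.mem_ofList l x).1 (by simpa [PySem.Set.contains] using h))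

-- one step of A's loop sends the model of l to the model of l ++ [x]
theorem pvModel_step (l : List Char) (x : Char) :
    (if (pvModel l).contains x = false
       then ((pvModel l).insert x [(l.length : Int)], (l.length : Int) + 1)
       else ((pvModel l).modify x [] (fun v => v ++ [(l.length : Int)]), (l.length : Int) + 1))
    = (pvModel (l ++ [x]), ((l ++ [x]).length : Int)) := by
  by_cases hx : x ∈ l
  · rw [if_neg (by simp [pvModel_contains, hx])]
    simp only [List.length_append, List.length_cons, List.length_nil, Nat.cast_add,
      Nat.cast_one, zero_add, Prod.mk.injEq]
    refine ⟨?_, trivial⟩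
    apply PySem.Dict.ext
    rw [PySem.Dict.modify, pvModel_getD l x hx,
      PySem.Dict.items_insert_of_contains _ _ (by simp [pvModel_contains, hx])]
    simp only [pvModel, pvDedup_append_singleton, if_pos hx, List.map_map]
    apply List.map_congr_left
    intro c _
    simp only [Function.comp, beq_iff_eq, pvIdxs_append_singleton]
    by_cases hcx : c = x
    · subst hcx; simp
    · simp [hcx, Ne.symm hcx]
  · rw [if_pos (by simp [pvModel_contains, hx])]
    simp only [List.length_append, List.length_cons, List.length_nil, Nat.cast_add,
      Nat.cast_one, zero_add, Prod.mk.injEq]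
    refine ⟨?_, trivial⟩
    apply PySem.Dict.ext
    rw [PySem.Dict.items_insert_of_not_contains _ _ (by simp [pvModel_contains, hx])]
    simp only [pvModel, pvDedup_append_singleton, if_neg hx, List.map_append, List.map_cons,
      List.map_nil]
    have h1 : ∀ c ∈ PySem.List.dedup l, (c, pvIdxs (l ++ [x]) c) = (c, pvIdxs l c) := by
      intro c hc
      have hcx : x ≠ c := fun h => hx (h ▸ (PySem.List.mem_dedup l c).1 hc)
      simp [pvIdxs_append_singleton, hcx]
    have h2 : pvIdxs (l ++ [x]) x = [(l.length : Int)] := by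
      simp [pvIdxs_append_singleton, pvIdxs_eq_nil_of_not_mem l x hx]
    rw [List.map_congr_left h1, h2]

theorem pvLoop_eq_model (l : List Char) :
    l.foldl
      (fun (s : PySem.Dict Char (List Int) × Int) c =>
        if s.1.contains c = false then (s.1.insert c [s.2], s.2 + 1)
        else (s.1.modify c [] (fun v => v ++ [s.2]), s.2 + 1))
      (PySem.Dict.empty, 0)
    = (pvModel l, (l.length : Int)) := by
  induction l using List.reverseRecOn with
  | nil => rfl
  | append_singleton l x ih =>
    rw [List.foldl_append, ih, List.foldl_cons, List.foldl_nil]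
    exact pvModel_step l x

-- ===== VERDICT (by name: the statement is the Claim_ definition above) =====
theorem analysisPattern_spec : Claim_equal_analysisPattern := by
  intro pattern _
  show analysisPattern pattern = analysisPattern_alt pattern
  rw [analysisPattern, pvLoop_eq_model]
  simp [pvModel, PySem.Dict.values, List.map_map, analysisPattern_alt, pvIdxs, Function.comp]
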